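-- pv_equiv track=rewrite | github.com/ezrashare21/2Dedit | edit.py | convertNS
-- ===== SOURCE A (Python) =====
-- def convertNS(array):
--     con = []
--     num = 0
--     for x in array:
--         num += 1
--         if num != len(array):
--             con.append("".join(list(x)[:len(x)-1]))
--         else:
--             con.append(x)
--     return con
-- ===== SOURCE B (Python) =====
-- def convertNS(array):
--     # Build the result back-to-front: walk the list in reverse, keep the
--     # first element seen (the original last) intact and strip every later
--     # one, then reverse the accumulated output.
--     out = []
--     first = True
--     for x in reversed(array):
--         out.append(x if first else x[:-1])
--         first = False
--     out.reverse()
--     return out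
-- ===== Notes on version B (the rewrite author's own statement) =====
-- stated objective: alternative
-- what changed: Builds the output back-to-front: iterates over reversed(array), keeping the first element seen (the original last) intact and stripping every subsequent one with x[:-1], then reverses the accumulator; this replaces A's forward pass with a counter and a per-iteration comparison against len(array) by a reversed traversal where the special element is simply the first one met.
import Mathlib
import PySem

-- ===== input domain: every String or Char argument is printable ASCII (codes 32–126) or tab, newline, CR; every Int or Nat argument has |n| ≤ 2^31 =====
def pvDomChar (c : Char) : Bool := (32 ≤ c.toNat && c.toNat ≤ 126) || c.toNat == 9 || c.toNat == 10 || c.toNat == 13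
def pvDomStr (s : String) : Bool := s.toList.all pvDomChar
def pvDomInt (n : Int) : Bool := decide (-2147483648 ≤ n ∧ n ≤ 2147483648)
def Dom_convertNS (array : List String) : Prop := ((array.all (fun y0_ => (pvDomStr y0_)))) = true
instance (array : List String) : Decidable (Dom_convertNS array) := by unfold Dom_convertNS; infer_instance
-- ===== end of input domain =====

-- B: builds the output back-to-front over reversed(array) (first seen kept, rest stripped) instead of A's forward counter loop; return value only.
-- ===== PORT A =====
def convertNS (array : List String) : List String :=
  (array.foldl (fun (st : List String × Int) x =>
      let num := st.2 + 1
      if num ≠ (array.length : Int) then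
        (st.1 ++ [String.mk (PySem.List.slice x.toList none (some ((x.toList.length : Int) - 1)))], num)
      else
        (st.1 ++ [x], num))
    ([], 0)).1

-- ===== PORT B =====
-- x[:-1]
def pvStripLast (x : String) : String :=
  String.mk (PySem.List.slice x.toList none (some (-1)))

def convertNS_alt (array : List String) : List String :=
  ((array.reverse.foldl (fun (st : List String × Bool) x =>
      (st.1 ++ [if st.2 then x else pvStripLast x], false))
    ([], true)).1).reverse

-- ===== PRECONDITION & SPEC =====
def Spec_convertNS (array : List String) (out : List String) : Prop := out = convertNS_alt array
instance (array : List String) (out : List String) : Decidable (Spec_convertNS array out) := by unfold Spec_convertNS; infer_instance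

-- ===== CLAIM (what is proved, stated in full; the proofs are below) =====
def Claim_equal_convertNS : Prop := ∀ (array : List String), Dom_convertNS array → Spec_convertNS array (convertNS array)

-- ===== LEMMAS AND PROOFS =====

-- A's strip list(x)[:len(x)-1] equals x[:-1]
theorem pvStripA_eq (x : String) :
    String.mk (PySem.List.slice x.toList none (some ((x.length : Int) - 1))) = pvStripLast x := by
  unfold pvStripLast
  congr 1
  rw [show (x.length : Int) = (x.toList.length : Int) by simp]
  generalize x.toList = l
  rcases l with _ | ⟨c, cs⟩
  · simp [PySem.List.slice]
  · have h1 : (((c :: cs).length : Int) - 1) = ((cs.length : Nat) : Int) := by simp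
    rw [h1, PySem.List.slice_to_natCast, PySem.List.slice_to_neg_one]
    simp [List.dropLast_eq_take]

def pvStepA (L : Int) (st : List String × Int) (x : String) : List String × Int :=
  let num := st.2 + 1
  if num ≠ L then
    (st.1 ++ [String.mk (PySem.List.slice x.toList none (some ((x.toList.length : Int) - 1)))], num)
  else
    (st.1 ++ [x], num)

-- A's loop appends the stripped elements then the last one untouched
theorem pvFoldA_eq (L : Int) (l : List String) (con : List String) (n : Int)
    (h : n + l.length = L) (hne : l ≠ []) :
    (l.foldl (pvStepA L) (con, n)).1
    = con ++ (l.dropLast.map pvStripLast) ++ [l.getLast hne] := by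
  induction l generalizing con n with
  | nil => exact absurd rfl hne
  | cons x xs ih =>
    rcases xs with _ | ⟨y, ys⟩
    · simp at h
      simp [List.foldl, pvStepA, h]
    · have hxs' : y :: ys ≠ [] := by simp
      have hcond : n + 1 ≠ L := by simp at h; omega
      rw [List.foldl_cons,
          show pvStepA L (con, n) x
             = (con ++ [String.mk (PySem.List.slice x.toList none (some ((x.toList.length : Int) - 1)))], n + 1)
            from by simp [pvStepA, hcond]]
      rw [ih (con ++ [String.mk (PySem.List.slice x.toList none (some ((x.toList.length : Int) - 1)))]) (n+1)
            (by simp at h ⊢; omega) hxs']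
      rw [List.dropLast_cons_of_ne_nil hxs', List.getLast_cons hxs']
      simp [pvStripA_eq]

def pvStepB (st : List String × Bool) (x : String) : List String × Bool :=
  (st.1 ++ [if st.2 then x else pvStripLast x], false)

-- once 'first' is false the loop simply appends stripped elements
theorem pvFoldB_false (r : List String) (con : List String) :
    r.foldl pvStepB (con, false) = (con ++ r.map pvStripLast, false) := by
  induction r generalizing con with
  | nil => simp
  | cons x xs ih => simp [List.foldl_cons, pvStepB, ih]

-- B's reversed pass computes the same "strip all-but-last, keep last" shape
theorem pvAlt_eq (l : List String) (hne : l ≠ []) :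
    convertNS_alt l = (l.dropLast.map pvStripLast) ++ [l.getLast hne] := by
  show ((l.reverse.foldl pvStepB ([], true)).1).reverse = _
  have hrev : l.reverse = l.getLast hne :: l.dropLast.reverse := by
    conv_lhs => rw [← List.dropLast_append_getLast hne]
    simp
  rw [hrev, List.foldl_cons,
      show pvStepB ([], true) (l.getLast hne) = ([l.getLast hne], false) from rfl,
      pvFoldB_false]
  simp

-- ===== VERDICT (by name: the statement is the Claim_ definition above) =====
theorem convertNS_spec : Claim_equal_convertNS := by
  intro array _
  unfold Spec_convertNS
  rcases array with _ | ⟨x, xs⟩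
  · rfl
  · show (List.foldl (pvStepA (((x::xs).length : Nat) : Int)) ([], 0) (x::xs)).1 = _
    rw [pvFoldA_eq (((x::xs).length : Nat) : Int) (x::xs) [] 0 (by simp) (by simp),
        pvAlt_eq (x::xs) (by simp)]
    simp
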